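-- pv_equiv track=rewrite | github.com/coolpint/kor-companies | src/kor_companies/article_context.py | _summary_candidate_pool
-- ===== SOURCE A (Python) =====
-- from typing import Any, List, Optional
--
-- def _summary_candidate_pool(sentences: List[str], relevant_indices: List[int]) -> List[int]:
--     if not relevant_indices:
--         return list(range(min(len(sentences), 6)))
--     selected = set()
--     for index in relevant_indices:
--         for candidate_index in range(max(0, index - 2), min(len(sentences), index + 3)):
--             selected.add(candidate_index)
--     return sorted(selected)
-- ===== SOURCE B (Python) =====
-- def _summary_candidate_pool(sentences, relevant_indices):
--     if not relevant_indices: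
--         return list(range(min(len(sentences), 6)))
--     near = set(relevant_indices)
--     return [j for j in range(len(sentences))
--             if any(j + d in near for d in (-2, -1, 0, 1, 2))]
-- ===== Notes on version B (the rewrite author's own statement) =====
-- stated objective: alternative
-- what changed: B inverts the direction of the scan: instead of expanding a window around each relevant index into a set and sorting it, B walks the sentence positions once and keeps position j iff one of j-2..j+2 is a relevant index (a 5-probe lookup in a set of the indices), so the output comes out already sorted and duplicate-free with no sort.
import Mathlib
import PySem

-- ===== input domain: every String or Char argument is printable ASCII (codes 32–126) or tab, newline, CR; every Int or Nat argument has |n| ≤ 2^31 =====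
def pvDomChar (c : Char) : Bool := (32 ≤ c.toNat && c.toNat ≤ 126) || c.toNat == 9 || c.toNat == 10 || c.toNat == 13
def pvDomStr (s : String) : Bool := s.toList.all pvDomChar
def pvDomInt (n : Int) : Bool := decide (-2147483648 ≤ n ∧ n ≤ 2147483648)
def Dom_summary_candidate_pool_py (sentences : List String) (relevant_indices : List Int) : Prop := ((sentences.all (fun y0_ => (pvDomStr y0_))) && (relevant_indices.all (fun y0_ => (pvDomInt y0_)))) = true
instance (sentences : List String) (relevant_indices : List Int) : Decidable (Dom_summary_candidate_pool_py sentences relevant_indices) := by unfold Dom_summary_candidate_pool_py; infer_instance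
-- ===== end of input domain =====

-- B inverts the scan direction: it walks the sentence positions once and keeps position j iff one of
-- j-2..j+2 lies in a set of the relevant indices, so the output comes out already sorted and
-- duplicate-free with no sort; objective: alternative.


-- ===== PORT A =====
def summary_candidate_pool_py (sentences : List String) (relevant_indices : List Int) : List Int :=
  if relevant_indices = [] then
    PySem.List.pyRange 0 (min (sentences.length : Int) 6) 1
  else
    let selected : PySem.Set Int :=
      relevant_indices.foldl (fun s index =>
        (PySem.List.pyRange (max 0 (index - 2)) (min (sentences.length : Int) (index + 3)) 1).foldl
          (fun s c => PySem.Set.add s c) s) PySem.Set.empty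
    PySem.List.sorted selected (fun x => x) false

-- ===== PORT B =====
def summary_candidate_pool_py_alt (sentences : List String) (relevant_indices : List Int) : List Int :=
  if relevant_indices = [] then
    PySem.List.pyRange 0 (min (sentences.length : Int) 6) 1
  else
    let near : PySem.Set Int := PySem.Set.ofList relevant_indices
    (PySem.List.pyRange 0 (sentences.length : Int) 1).filter
      (fun j => [(-2 : Int), -1, 0, 1, 2].any (fun d => decide ((j + d) ∈ near)))

-- ===== PRECONDITION & SPEC =====
def Spec_summary_candidate_pool_py (sentences : List String) (relevant_indices : List Int) (out : List Int) : Prop := out = summary_candidate_pool_py_alt sentences relevant_indices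
instance (sentences : List String) (relevant_indices : List Int) (out : List Int) : Decidable (Spec_summary_candidate_pool_py sentences relevant_indices out) := by unfold Spec_summary_candidate_pool_py; infer_instance

-- ===== CLAIM (what is proved, stated in full; the proofs are below) =====
def Claim_equal_summary_candidate_pool_py : Prop := ∀ (sentences : List String) (relevant_indices : List Int), Dom_summary_candidate_pool_py sentences relevant_indices → Spec_summary_candidate_pool_py sentences relevant_indices (summary_candidate_pool_py sentences relevant_indices)

-- ===== LEMMAS AND PROOFS =====

-- membership in the nested set accumulation of A's two loops
theorem mem_nested_fold (n : Int) (l : List Int) (s : PySem.Set Int) (y : Int) :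
    y ∈ l.foldl (fun s index =>
        (PySem.List.pyRange (max 0 (index - 2)) (min n (index + 3)) 1).foldl
          (fun s c => PySem.Set.add s c) s) s ↔
      y ∈ s ∨ ∃ index ∈ l, max 0 (index - 2) ≤ y ∧ y < min n (index + 3) := by
  induction l generalizing s with
  | nil => simp
  | cons a t ih =>
    simp only [List.foldl_cons, ih, PySem.Set.mem_foldl_add (f := fun (b : Int) => b),
      PySem.List.mem_pyRange_one, List.mem_cons]
    constructor
    · rintro (⟨h | ⟨b, hb, rfl⟩⟩ | ⟨i, hi, h1, h2⟩)
      · exact Or.inl h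
      · exact Or.inr ⟨a, Or.inl rfl, hb⟩
      · exact Or.inr ⟨i, Or.inr hi, h1, h2⟩
    · rintro (h | ⟨i, (rfl | hi), h1, h2⟩)
      · exact Or.inl (Or.inl h)
      · exact Or.inl (Or.inr ⟨y, ⟨h1, h2⟩, rfl⟩)
      · exact Or.inr ⟨i, hi, h1, h2⟩

theorem nodup_foldl_add (l : List Int) (s : PySem.Set Int) (hs : s.Nodup) :
    (l.foldl (fun s c => PySem.Set.add s c) s).Nodup := by
  induction l generalizing s with
  | nil => exact hs
  | cons a t ih => exact ih _ (PySem.Set.nodup_add s a hs)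

theorem nodup_nested_fold (n : Int) (l : List Int) (s : PySem.Set Int) (hs : s.Nodup) :
    (l.foldl (fun s index =>
        (PySem.List.pyRange (max 0 (index - 2)) (min n (index + 3)) 1).foldl
          (fun s c => PySem.Set.add s c) s) s).Nodup := by
  induction l generalizing s with
  | nil => exact hs
  | cons a t ih => exact ih _ (nodup_foldl_add _ _ hs)

-- ===== VERDICT (by name: the statement is the Claim_ definition above) =====
theorem summary_candidate_pool_py_spec : Claim_equal_summary_candidate_pool_py := by
  intro sentences relevant_indices _
  unfold Spec_summary_candidate_pool_py summary_candidate_pool_py summary_candidate_pool_py_alt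
  by_cases h : relevant_indices = []
  · simp [h]
  · rw [if_neg h, if_neg h]
    set n : Int := (sentences.length : Int) with hn
    set sel : PySem.Set Int :=
      relevant_indices.foldl (fun s index =>
        (PySem.List.pyRange (max 0 (index - 2)) (min n (index + 3)) 1).foldl
          (fun s c => PySem.Set.add s c) s) PySem.Set.empty with hsel
    set ys : List Int :=
      (PySem.List.pyRange 0 n 1).filter
        (fun j => [(-2 : Int), -1, 0, 1, 2].any
          (fun d => decide ((j + d) ∈ PySem.Set.ofList relevant_indices))) with hys
    have hys_pw : ys.Pairwise (· < ·) :=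
      (PySem.List.pairwise_lt_pyRange_one 0 n).filter _
    apply PySem.List.sorted_eq_of_perm_of_pairwise_lt
    · have hnd1 : ys.Nodup := hys_pw.imp (fun h => ne_of_lt h)
      have hnd2 : sel.Nodup := nodup_nested_fold n relevant_indices PySem.Set.empty (by simp [PySem.Set.empty])
      rw [List.perm_ext_iff_of_nodup hnd1 hnd2]
      intro x
      rw [hys, hsel, mem_nested_fold]
      simp only [List.mem_filter, PySem.List.mem_pyRange_one, List.any_eq_true, decide_eq_true_eq,
        PySem.Set.mem_ofList, PySem.Set.empty, List.mem_cons, List.not_mem_nil, or_false]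
      constructor
      · rintro ⟨⟨h0, hxn⟩, d, hd, hmem⟩
        refine Or.inr ⟨x + d, hmem, by rcases hd with rfl|rfl|rfl|rfl|rfl <;> omega,
          by rcases hd with rfl|rfl|rfl|rfl|rfl <;> omega⟩
      · rintro (hx | ⟨i, hi, h1, h2⟩)
        · simp at hx
        · refine ⟨⟨by omega, by omega⟩, i - x, ?_, by simpa using hi⟩
          omega
    · simpa using hys_pw
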